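-- pv_equiv track=rewrite | github.com/gauravnirmalkumar/ML-Project | main.py | _detect_entity_type
-- ===== SOURCE A (Python) =====
-- def _detect_entity_type(text: str) -> str:
--     """Detect entity type based on custom patterns"""
--     text_lower = text.lower()
--     custom_patterns = {
--         'TECHNOLOGY': ['ai', 'artificial intelligence', 'machine learning', 'blockchain'],
--         'VEHICLE': ['car', 'truck', 'vehicle', 'suv', 'van'],
--         'DISEASE': ['cancer', 'diabetes', 'covid', 'covid-19', 'coronavirus']
--     }
--
--     for entity_type, patterns in custom_patterns.items():
--         if text_lower in patterns:
--             return entity_type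
--     return None
-- ===== SOURCE B (Python) =====
-- _PAIRS = []
-- for _etype, _patterns in {
--     'TECHNOLOGY': ['ai', 'artificial intelligence', 'machine learning', 'blockchain'],
--     'VEHICLE': ['car', 'truck', 'vehicle', 'suv', 'van'],
--     'DISEASE': ['cancer', 'diabetes', 'covid', 'covid-19', 'coronavirus'],
-- }.items():
--     for _p in _patterns:
--         _PAIRS.append((_p, _etype))
-- _SORTED = sorted(_PAIRS, key=lambda kv: kv[0])
--
--
-- def _detect_entity_type(text: str) -> str:
--     """Detect entity type by binary search in a sorted (pattern, type) table."""
--     t = text.lower()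
--     lo, hi = 0, len(_SORTED)
--     while lo < hi:
--         mid = (lo + hi) // 2
--         if _SORTED[mid][0] < t:
--             lo = mid + 1
--         else:
--             hi = mid
--     if lo < len(_SORTED) and _SORTED[lo][0] == t:
--         return _SORTED[lo][1]
--     return None
-- ===== Notes on version B (the rewrite author's own statement) =====
-- stated objective: alternative
-- what changed: Replaces A's linear scan over categories with list-membership tests by a flattened (pattern, type) table sorted by pattern once, queried per call with a lower-bound binary search followed by one equality check.
import Mathlib
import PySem

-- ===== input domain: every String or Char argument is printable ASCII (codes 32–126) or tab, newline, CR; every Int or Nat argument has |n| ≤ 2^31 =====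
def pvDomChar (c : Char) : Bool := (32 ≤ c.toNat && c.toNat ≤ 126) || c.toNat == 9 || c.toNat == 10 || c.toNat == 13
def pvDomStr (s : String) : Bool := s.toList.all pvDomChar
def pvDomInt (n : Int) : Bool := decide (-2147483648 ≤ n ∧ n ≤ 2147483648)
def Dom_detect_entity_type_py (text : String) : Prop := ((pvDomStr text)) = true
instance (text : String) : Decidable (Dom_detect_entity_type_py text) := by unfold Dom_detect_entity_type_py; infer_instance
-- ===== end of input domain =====

-- B replaces A's linear scan over categories by a sorted flat (pattern, type) table
-- queried with a lower-bound binary search (alternative algorithm; same results).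

-- ===== PORT A =====
-- the category -> patterns table, as A writes it
def pvCustomPatterns : List (String × List String) :=
  [("TECHNOLOGY", ["ai", "artificial intelligence", "machine learning", "blockchain"]),
   ("VEHICLE", ["car", "truck", "vehicle", "suv", "van"]),
   ("DISEASE", ["cancer", "diabetes", "covid", "covid-19", "coronavirus"])]

-- the 'for entity_type, patterns in custom_patterns.items(): if text_lower in patterns: return …' loop
def pvScanA (items : List (String × List String)) (tl : String) : Option String :=
  match items with
  | [] => none
  | (entityType, patterns) :: rest =>
      if tl ∈ patterns then some entityType else pvScanA rest tl

def detect_entity_type_py (text : String) : Option String :=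
  let textLower := PySem.Str.lower text
  pvScanA pvCustomPatterns textLower


-- ===== PORT B =====
-- Source B's module-level loop flattening the table into (pattern, type) pairs
-- (pattern keys carried as List Char: Python's string '<' is codepoint-lexicographic, exactly List Char '<')
def pvPairs : List (List Char × String) :=
  pvCustomPatterns.foldl
    (fun acc p => p.2.foldl (fun acc pat => acc ++ [(pat.toList, p.1)]) acc) []

-- _SORTED = sorted(_PAIRS, key=lambda kv: kv[0])
def pvSorted : List (List Char × String) :=
  PySem.List.sorted pvPairs (fun kv => kv.1) false

-- the 'while lo < hi' lower-bound binary search; fuel bounds the iteration count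
-- (fuel = len(_SORTED) steps suffice since hi - lo shrinks every iteration)
def pvBS (arr : List (List Char × String)) (t : List Char) : Nat → Nat → Nat → Nat
  | 0, lo, _ => lo
  | fuel + 1, lo, hi =>
      if lo < hi then
        let mid := (lo + hi) / 2
        if (arr.getD mid ([], "")).1 < t then pvBS arr t fuel (mid + 1) hi
        else pvBS arr t fuel lo mid
      else lo

def detect_entity_type_py_alt (text : String) : Option String :=
  let t := (PySem.Str.lower text).toList
  let lo := pvBS pvSorted t pvSorted.length 0 pvSorted.length
  if lo < pvSorted.length then
    if (pvSorted.getD lo ([], "")).1 = t then some (pvSorted.getD lo ([], "")).2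
    else none
  else none

-- ===== PRECONDITION & SPEC =====
def Spec_detect_entity_type_py (text : String) (out : Option String) : Prop := out = detect_entity_type_py_alt text
instance (text : String) (out : Option String) : Decidable (Spec_detect_entity_type_py text out) := by unfold Spec_detect_entity_type_py; infer_instance

-- ===== CLAIM (what is proved, stated in full; the proofs are below) =====
def Claim_equal_detect_entity_type_py : Prop := ∀ (text : String), Dom_detect_entity_type_py text → Spec_detect_entity_type_py text (detect_entity_type_py text)

-- ===== LEMMAS AND PROOFS =====
-- the sorted table evaluates to this literal
lemma pvSorted_eq : pvSorted =
    [("ai".toList, "TECHNOLOGY"), ("artificial intelligence".toList, "TECHNOLOGY"),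
     ("blockchain".toList, "TECHNOLOGY"), ("cancer".toList, "DISEASE"), ("car".toList, "VEHICLE"),
     ("coronavirus".toList, "DISEASE"), ("covid".toList, "DISEASE"), ("covid-19".toList, "DISEASE"),
     ("diabetes".toList, "DISEASE"), ("machine learning".toList, "TECHNOLOGY"),
     ("suv".toList, "VEHICLE"), ("truck".toList, "VEHICLE"), ("van".toList, "VEHICLE"),
     ("vehicle".toList, "VEHICLE")] := by decide

-- ===== VERDICT (by name: the statement is the Claim_ definition above) =====
theorem detect_entity_type_py_spec : Claim_equal_detect_entity_type_py := by
  intro text _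
  unfold Spec_detect_entity_type_py detect_entity_type_py detect_entity_type_py_alt
  generalize PySem.Str.lower text = tl
  by_cases h0 : tl = "ai"
  · subst h0; decide
  by_cases h1 : tl = "artificial intelligence"
  · subst h1; decide
  by_cases h2 : tl = "machine learning"
  · subst h2; decide
  by_cases h3 : tl = "blockchain"
  · subst h3; decide
  by_cases h4 : tl = "car"
  · subst h4; decide
  by_cases h5 : tl = "truck"
  · subst h5; decide
  by_cases h6 : tl = "vehicle"
  · subst h6; decide
  by_cases h7 : tl = "suv"
  · subst h7; decide
  by_cases h8 : tl = "van"
  · subst h8; decide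
  by_cases h9 : tl = "cancer"
  · subst h9; decide
  by_cases h10 : tl = "diabetes"
  · subst h10; decide
  by_cases h11 : tl = "covid"
  · subst h11; decide
  by_cases h12 : tl = "covid-19"
  · subst h12; decide
  by_cases h13 : tl = "coronavirus"
  · subst h13; decide
  -- tl matches no pattern: A's scan returns none, and B's final key check fails
  have hA : pvScanA pvCustomPatterns tl = none := by
    simp [pvCustomPatterns, pvScanA, h0, h1, h2, h3, h4, h5, h6, h7, h8, h9, h10, h11, h12, h13]
  simp only [hA, pvSorted_eq]
  generalize pvBS _ tl.toList _ 0 _ = lo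
  by_cases hlen : lo < ([("ai".toList, "TECHNOLOGY"), ("artificial intelligence".toList, "TECHNOLOGY"),
     ("blockchain".toList, "TECHNOLOGY"), ("cancer".toList, "DISEASE"), ("car".toList, "VEHICLE"),
     ("coronavirus".toList, "DISEASE"), ("covid".toList, "DISEASE"), ("covid-19".toList, "DISEASE"),
     ("diabetes".toList, "DISEASE"), ("machine learning".toList, "TECHNOLOGY"),
     ("suv".toList, "VEHICLE"), ("truck".toList, "VEHICLE"), ("van".toList, "VEHICLE"),
     ("vehicle".toList, "VEHICLE")] : List (List Char × String)).length
  · rw [if_pos hlen, if_neg]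
    intro hkey
    have hmem := List.getElem_mem hlen
    rw [← List.getD_eq_getElem _ ([], "") hlen] at hmem
    have hinj : ∀ s : String, s.toList = tl.toList → tl = s := by
      intro s h; exact (String.toList_injective h).symm
    simp only [List.mem_cons, List.not_mem_nil, or_false] at hmem
    rcases hmem with h|h|h|h|h|h|h|h|h|h|h|h|h|h <;> rw [h] at hkey
    exacts [h0 (hinj _ hkey), h1 (hinj _ hkey), h3 (hinj _ hkey), h9 (hinj _ hkey),
      h4 (hinj _ hkey), h13 (hinj _ hkey), h11 (hinj _ hkey), h12 (hinj _ hkey),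
      h10 (hinj _ hkey), h2 (hinj _ hkey), h7 (hinj _ hkey), h5 (hinj _ hkey),
      h8 (hinj _ hkey), h6 (hinj _ hkey)]
  · rw [if_neg hlen]
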